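-- pv_equiv track=rewrite | github.com/devdutt728/SL-Platform | SL_IT/backend/app/core/auth.py | _derive_name_from_email
-- ===== SOURCE A (Python) =====
-- def _derive_name_from_email(email: str) -> str:
--     local = email.split("@", 1)[0].strip()
--     if not local:
--         return email
--     parts = [p for p in local.replace("_", ".").split(".") if p]
--     if not parts:
--         return local
--     return " ".join(p[:1].upper() + p[1:] for p in parts)
-- ===== SOURCE B (Python) =====
-- def _derive_name_from_email(email: str) -> str:
--     local = email.split("@", 1)[0].strip()
--     if not local:
--         return email
--     tokens = []
--     buf = ""
--     for ch in local:
--         if ch == "." or ch == "_":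
--             if buf:
--                 tokens.append(buf[:1].upper() + buf[1:])
--             buf = ""
--         else:
--             buf += ch
--     if buf:
--         tokens.append(buf[:1].upper() + buf[1:])
--     if not tokens:
--         return local
--     return " ".join(tokens)
-- ===== Notes on version B (the rewrite author's own statement) =====
-- stated objective: alternative
-- what changed: Replaces the underscore-to-dot replace / split / filter / join pipeline over intermediate lists with a single left-to-right pass that maintains a token buffer, flushing and capitalizing a token at each separator character.
import Mathlib
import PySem

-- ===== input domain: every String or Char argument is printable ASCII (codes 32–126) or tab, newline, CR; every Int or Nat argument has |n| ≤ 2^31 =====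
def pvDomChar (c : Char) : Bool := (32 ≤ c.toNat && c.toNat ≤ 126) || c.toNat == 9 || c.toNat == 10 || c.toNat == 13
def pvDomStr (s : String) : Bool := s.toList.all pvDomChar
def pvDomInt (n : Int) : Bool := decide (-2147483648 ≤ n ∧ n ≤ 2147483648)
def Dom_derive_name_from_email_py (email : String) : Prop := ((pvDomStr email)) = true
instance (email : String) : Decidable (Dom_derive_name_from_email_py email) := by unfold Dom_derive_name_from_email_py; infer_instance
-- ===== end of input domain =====

-- B re-implements the same derivation as one pass with a token buffer instead of A's replace/split/filter pipeline; return values are proved equal on all inputs.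

-- shared first lines of both Pythons: email.split("@", 1)[0].strip()
-- (split("@",1) always yields a nonempty list, so [0] is total: headD transliterates it exactly)
def pyLocal (email : String) : List Char :=
  PySem.Chars.strip ((PySem.Chars.splitOnMax email.toList ['@'] 1).headD [])

-- p[:1].upper() + p[1:]  (appears verbatim in both Pythons)
def pyCap (p : List Char) : List Char :=
  PySem.Chars.upper (PySem.List.slice p none (some 1)) ++ PySem.List.slice p (some 1) none

-- ===== PORT A =====
def derive_name_from_email_py (email : String) : String :=
  let locl := pyLocal email
  if locl = [] then email
  else
    let parts := (PySem.Chars.splitOn (PySem.Chars.replace locl ['_'] ['.']) ['.']).filter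
      (fun p => !p.isEmpty)
    if parts = [] then String.ofList locl
    else String.ofList (PySem.Chars.join [' '] (parts.map pyCap))

-- ===== PORT B =====
-- the loop body of Source B: flush the buffer (capitalized) at a separator, else extend it
def pyFlush (toks : List (List Char)) (buf : List Char) : List (List Char) :=
  if buf = [] then toks else toks ++ [pyCap buf]

def pyStep (st : List (List Char) × List Char) (c : Char) : List (List Char) × List Char :=
  if c = '.' || c = '_' then (pyFlush st.1 st.2, []) else (st.1, st.2 ++ [c])

def derive_name_from_email_py_alt (email : String) : String :=
  let locl := pyLocal email
  if locl = [] then email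
  else
    let st := locl.foldl pyStep ([], [])
    let toks := pyFlush st.1 st.2
    if toks = [] then String.ofList locl
    else String.ofList (PySem.Chars.join [' '] toks)

-- ===== PRECONDITION & SPEC =====
def Spec_derive_name_from_email_py (email : String) (out : String) : Prop := out = derive_name_from_email_py_alt email
instance (email : String) (out : String) : Decidable (Spec_derive_name_from_email_py email out) := by unfold Spec_derive_name_from_email_py; infer_instance

-- ===== CLAIM (what is proved, stated in full; the proofs are below) =====
def Claim_equal_derive_name_from_email_py : Prop := ∀ (email : String), Dom_derive_name_from_email_py email → Spec_derive_name_from_email_py email (derive_name_from_email_py email)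

-- ===== LEMMAS AND PROOFS =====

-- '_' ↦ '.' as a per-character map
def pvSub (c : Char) : Char := if c = '_' then '.' else c

-- specification of splitting on '.' with accumulator cur (reversed current piece)
def pvRaw : List Char → List Char → List (List Char)
  | [], cur => [cur.reverse]
  | c :: t, cur => if c = '.' then cur.reverse :: pvRaw t [] else pvRaw t (c :: cur)

lemma pvReplace_go_single : ∀ (fuel : ℕ) (l acc : List Char), l.length ≤ fuel →
    PySem.Chars.replace.go ['_'] ['.'] fuel l acc = acc.reverse ++ l.map pvSub := by
  intro fuel
  induction fuel with
  | zero =>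
      intro l acc h
      have : l = [] := List.length_eq_zero_iff.mp (Nat.le_zero.mp h)
      subst this; simp [PySem.Chars.replace.go]
  | succ n ih =>
      intro l acc h
      cases l with
      | nil => simp [PySem.Chars.replace.go]
      | cons c t =>
          simp only [PySem.Chars.replace.go]
          by_cases hc : c = '_'
          · subst hc
            rw [if_pos (by simp [List.isPrefixOf])]
            rw [show List.drop ['_'].length ('_' :: t) = t from rfl,
                show ['.'].reverse ++ acc = '.' :: acc from rfl]
            rw [ih t _ (by simpa using Nat.le_of_succ_le_succ h)]
            simp [pvSub]
          · rw [if_neg (by simp [List.isPrefixOf]; exact fun h' => hc h'.symm)]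
            rw [ih t _ (by simpa using Nat.le_of_succ_le_succ h)]
            simp [pvSub, hc]

lemma pvReplace_single (l : List Char) :
    PySem.Chars.replace l ['_'] ['.'] = l.map pvSub := by
  simp [PySem.Chars.replace, pvReplace_go_single l.length l [] (le_refl _)]

lemma pvSplit_go_single : ∀ (fuel : ℕ) (l cur : List Char) (acc : List (List Char)),
    l.length ≤ fuel →
    PySem.Chars.splitOn.go ['.'] fuel l cur acc = acc.reverse ++ pvRaw l cur := by
  intro fuel
  induction fuel with
  | zero =>
      intro l cur acc h
      have : l = [] := List.length_eq_zero_iff.mp (Nat.le_zero.mp h)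
      subst this; simp [PySem.Chars.splitOn.go, pvRaw]
  | succ n ih =>
      intro l cur acc h
      cases l with
      | nil => simp [PySem.Chars.splitOn.go, pvRaw]
      | cons c t =>
          simp only [PySem.Chars.splitOn.go]
          by_cases hc : c = '.'
          · subst hc
            rw [if_pos (by simp [List.isPrefixOf])]
            rw [show List.drop ['.'].length ('.' :: t) = t from rfl]
            rw [ih _ _ _ (by simpa using Nat.le_of_succ_le_succ h)]
            simp [pvRaw]
          · rw [if_neg (by simp [List.isPrefixOf]; exact fun h' => hc h'.symm)]
            rw [ih _ _ _ (by simpa using Nat.le_of_succ_le_succ h)]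
            simp [pvRaw, hc]

lemma pvSplit_single (l : List Char) :
    PySem.Chars.splitOn l ['.'] = pvRaw l [] := by
  simp [PySem.Chars.splitOn, pvSplit_go_single (l.length + 1) l [] [] (by omega)]

lemma pvFold_spec : ∀ (l : List Char) (toks : List (List Char)) (buf : List Char),
    pyFlush (l.foldl pyStep (toks, buf)).1 (l.foldl pyStep (toks, buf)).2
      = toks ++ ((pvRaw (l.map pvSub) buf.reverse).filter (fun p => !p.isEmpty)).map pyCap := by
  intro l
  induction l with
  | nil =>
      intro toks buf
      simp only [List.foldl_nil, List.map_nil, pvRaw, List.reverse_reverse, pyFlush]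
      by_cases hb : buf = [] <;> simp [hb]
  | cons c t ih =>
      intro toks buf
      simp only [List.foldl_cons, List.map_cons]
      by_cases hc : c = '.' ∨ c = '_'
      · have hstep : pyStep (toks, buf) c = (pyFlush toks buf, []) := by
          rcases hc with hc | hc <;> simp [pyStep, hc]
        have hsub : pvSub c = '.' := by rcases hc with hc | hc <;> simp [pvSub, hc]
        rw [hstep, ih, hsub]
        simp only [pvRaw, List.reverse_reverse]
        by_cases hb : buf = [] <;> simp [pyFlush, hb]
      · have hc1 : c ≠ '.' := fun h => hc (Or.inl h)
        have hc2 : c ≠ '_' := fun h => hc (Or.inr h)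
        have hstep : pyStep (toks, buf) c = (toks, buf ++ [c]) := by
          simp [pyStep, hc1, hc2]
        have hsub : pvSub c = c := by simp [pvSub, hc2]
        rw [hstep, ih, hsub]
        simp [pvRaw, hc1]

-- ===== VERDICT (by name: the statement is the Claim_ definition above) =====
theorem derive_name_from_email_py_spec : Claim_equal_derive_name_from_email_py := by
  intro email _
  unfold Spec_derive_name_from_email_py derive_name_from_email_py derive_name_from_email_py_alt
  by_cases hl : pyLocal email = []
  · simp [hl]
  · simp only [hl]
    have key := pvFold_spec (pyLocal email) [] []
    simp only [List.reverse_nil, List.nil_append] at key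
    rw [pvReplace_single, pvSplit_single]
    rw [key]
    by_cases hp : (pvRaw ((pyLocal email).map pvSub) []).filter (fun p => !p.isEmpty) = []
    · simp [hp]
    · simp [hp]
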